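-- pv_equiv track=rewrite | github.com/Bugzey/Softuni-Python-Fundamentals | 07. Python-Fundamentals-Strings-and-Text-Processing/12 Nilapdromes.py | find_nilaps
-- ===== SOURCE A (Python) =====
-- def find_nilaps(string):
--     max_length = (len(string) + 1) // 2
--     max_side = ''
--     for item in range(max_length):
--         str_left = string[:item]
--         str_right = string[-item:]
--         if str_left == str_right:
--             max_side = str_left
--
--     if max_side == '':
--         result = None
--     else:
--         core = string.replace(max_side, '')
--         result = core + max_side + core
--
--     return(result)
-- ===== SOURCE B (Python) =====
-- def find_nilaps(string):
--     n = len(string)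
--     if n == 0:
--         return None
--     # KMP prefix function: pi[i] = length of longest proper border of string[:i+1]
--     pi = [0]
--     for i in range(1, n):
--         k = pi[i - 1]
--         while k > 0 and string[i] != string[k]:
--             k = pi[k - 1]
--         if string[i] == string[k]:
--             k += 1
--         pi.append(k)
--     # longest border not exceeding (n + 1) // 2 - 1: walk the border chain down
--     k = pi[n - 1]
--     limit = (n + 1) // 2 - 1
--     while k > limit:
--         k = pi[k - 1]
--     if k == 0:
--         return None
--     side = string[:k]
--     core = string.replace(side, '')
--     return core + side + core
-- ===== Notes on version B (the rewrite author's own statement) =====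
-- stated objective: faster
-- what changed: B computes the KMP prefix (failure) function of the string in one linear pass and walks the border chain down to the first border within the allowed length, replacing A's quadratic scan that slices and compares a fresh prefix/suffix pair for every candidate length.
import Mathlib
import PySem

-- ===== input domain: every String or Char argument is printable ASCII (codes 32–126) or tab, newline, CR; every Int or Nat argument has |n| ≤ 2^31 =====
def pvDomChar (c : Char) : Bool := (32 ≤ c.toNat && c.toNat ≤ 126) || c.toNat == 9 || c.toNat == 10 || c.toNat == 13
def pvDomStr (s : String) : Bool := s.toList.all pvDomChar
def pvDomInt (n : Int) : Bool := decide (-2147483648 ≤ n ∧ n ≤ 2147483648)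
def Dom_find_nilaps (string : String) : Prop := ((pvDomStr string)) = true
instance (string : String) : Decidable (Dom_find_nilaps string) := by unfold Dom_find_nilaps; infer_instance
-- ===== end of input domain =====

-- B replaces A's quadratic slice-and-compare scan over all candidate border lengths with the
-- linear-time KMP prefix (failure) function followed by a walk down the border chain.

-- ===== PORT A =====
def find_nilaps (string : String) : Option String :=
  let max_length : Int := PySem.Int.floordiv (PySem.Str.len string + 1) 2
  let max_side : String :=
    (PySem.List.pyRange 0 max_length 1).foldl (fun max_side item =>
      let str_left := PySem.Str.slice string none (some item)
      let str_right := PySem.Str.slice string (some (-item)) none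
      if str_left = str_right then str_left else max_side) ""
  if max_side = "" then none
  else
    let core := PySem.Str.replace string max_side ""
    some (core ++ max_side ++ core)

-- ===== PORT B =====
-- the inner `while k > 0 and string[i] != string[k]: k = pi[k-1]` loop; fuel makes it total
-- (fuel = the entering k suffices, since pi[j] ≤ j for the computed prefix function)
def pvFall (s : List Char) (pi : List Nat) (c : Char) : Nat → Nat → Nat
  | 0, k => k
  | fuel + 1, k =>
    if 0 < k ∧ ¬ s.getD k ' ' = c then pvFall s pi c fuel (pi.getD (k - 1) 0) else k

-- one iteration of `for i in range(1, n)`: compute pi[i] and append it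
def pvStep (s : List Char) (pi : List Nat) (i : Nat) : List Nat :=
  let k0 := pi.getD (i - 1) 0
  let c := s.getD i ' '
  let k1 := pvFall s pi c k0 k0
  let k2 := if c = s.getD k1 ' ' then k1 + 1 else k1
  pi ++ [k2]

-- pi = [0]; for i in range(1, n): ... pi.append(k)
def pvPi (s : List Char) : List Nat := (List.range' 1 (s.length - 1)).foldl (pvStep s) [0]

-- the final `while k > limit: k = pi[k-1]` chain walk; fuel as above
def pvChase (pi : List Nat) (limit : Nat) : Nat → Nat → Nat
  | 0, k => k
  | fuel + 1, k => if limit < k then pvChase pi limit fuel (pi.getD (k - 1) 0) else k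

def find_nilaps_alt (string : String) : Option String :=
  let s := string.toList
  let n := s.length
  if n = 0 then none
  else
    let pi := pvPi s
    let k0 := pi.getD (n - 1) 0
    let limit := (n + 1) / 2 - 1
    let k := pvChase pi limit k0 k0
    if k = 0 then none
    else
      let side := PySem.Str.slice string none (some (k : Int))
      let core := PySem.Str.replace string side ""
      some (core ++ side ++ core)

-- ===== PRECONDITION & SPEC =====
def Spec_find_nilaps (string : String) (out : Option String) : Prop := out = find_nilaps_alt string
instance (string : String) (out : Option String) : Decidable (Spec_find_nilaps string out) := by unfold Spec_find_nilaps; infer_instance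

-- ===== CLAIM (what is proved, stated in full; the proofs are below) =====
def Claim_equal_find_nilaps : Prop := ∀ (string : String), Dom_find_nilaps string → Spec_find_nilaps string (find_nilaps string)

-- ===== LEMMAS AND PROOFS =====

-- `idxB l len k` : k is a border of the length-`len` prefix of l (index-wise formulation)
def idxB (l : List Char) (len k : Nat) : Bool :=
  decide (k ≤ len) && (List.range k).all (fun m => l[m]? == l[len - k + m]?)

-- longest PROPER border of the length-`len` prefix of l (0 if none)
def mB (l : List Char) (len : Nat) : Nat := Nat.findGreatest (fun k => idxB l len k = true) (len - 1)

lemma idxB_iff (l : List Char) (len k : Nat) :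
    idxB l len k = true ↔ k ≤ len ∧ ∀ m < k, l[m]? = l[len - k + m]? := by
  simp [idxB, List.all_eq_true, List.mem_range]

lemma idxB_zero (l : List Char) (len : Nat) : idxB l len 0 = true := by
  simp [idxB_iff]

-- borders nest: a smaller border j of the same prefix is a border of the length-k prefix
lemma idxB_nest (l : List Char) (len k j : Nat) (hk : idxB l len k = true)
    (hj : idxB l len j = true) (hjk : j ≤ k) : idxB l k j = true := by
  rw [idxB_iff] at hk hj ⊢
  obtain ⟨hk1, hk2⟩ := hk
  obtain ⟨hj1, hj2⟩ := hj
  refine ⟨hjk, fun m hm => ?_⟩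
  have h1 := hj2 m hm
  have h2 := hk2 (k - j + m) (by omega)
  have e1 : len - k + (k - j + m) = len - j + m := by omega
  rw [e1] at h2
  rw [h1, ← h2]

-- a border of a border is a border
lemma idxB_trans (l : List Char) (len k j : Nat) (hk : idxB l len k = true)
    (hj : idxB l k j = true) : idxB l len j = true := by
  rw [idxB_iff] at hk hj ⊢
  obtain ⟨hk1, hk2⟩ := hk
  obtain ⟨hj1, hj2⟩ := hj
  refine ⟨by omega, fun m hm => ?_⟩
  have h1 := hj2 m hm
  have h2 := hk2 (k - j + m) (by omega)
  have e1 : len - k + (k - j + m) = len - j + m := by omega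
  rw [e1] at h2
  rw [h1, h2]

-- extension: k+1 borders the (len+1)-prefix iff k borders the len-prefix and l[k] = l[len]
lemma idxB_ext (l : List Char) (len k : Nat) :
    idxB l (len + 1) (k + 1) = true ↔ (idxB l len k = true ∧ l[k]? = l[len]?) := by
  rw [idxB_iff, idxB_iff]
  constructor
  · rintro ⟨h1, h2⟩
    have hk := h2 k (by omega)
    have e : len + 1 - (k + 1) + k = len := by omega
    rw [e] at hk
    refine ⟨⟨by omega, fun m hm => ?_⟩, hk⟩
    have h3 := h2 m (by omega)
    have e2 : len + 1 - (k + 1) + m = len - k + m := by omega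
    rwa [e2] at h3
  · rintro ⟨⟨h1, h2⟩, h3⟩
    refine ⟨by omega, fun m hm => ?_⟩
    rcases Nat.lt_succ_iff_lt_or_eq.mp hm with hm' | hm'
    · have h4 := h2 m hm'
      have e2 : len + 1 - (k + 1) + m = len - k + m := by omega
      rwa [e2]
    · rw [hm']
      have e2 : len + 1 - (k + 1) + k = len := by omega
      rw [e2]
      exact h3

lemma mB_border (l : List Char) (len : Nat) : idxB l len (mB l len) = true :=
  Nat.findGreatest_spec (P := fun k => idxB l len k = true) (Nat.zero_le _) (idxB_zero l len)

lemma mB_lt (l : List Char) (len : Nat) (h : 1 ≤ len) : mB l len < len := by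
  have := Nat.findGreatest_le (P := fun k => idxB l len k = true) (len - 1)
  unfold mB
  omega

lemma mB_ge (l : List Char) (len j : Nat) (hj : idxB l len j = true) (hle : j ≤ len - 1) :
    j ≤ mB l len := Nat.le_findGreatest hle hj

lemma mB_one (l : List Char) : mB l 1 = 0 := by
  unfold mB; simp

-- specification of the inner while loop (pvFall)
lemma fall_spec (l : List Char) (pi : List Nat) (len : Nat) (hlen : len ≤ l.length)
    (hpi : ∀ j < len, pi.getD j 0 = mB l (j + 1)) (c : Char) :
    ∀ fuel k, k ≤ fuel → idxB l len k = true → k < len →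
      idxB l len (pvFall l pi c fuel k) = true ∧
      pvFall l pi c fuel k ≤ k ∧
      (pvFall l pi c fuel k = 0 ∨ l[pvFall l pi c fuel k]? = some c) ∧
      (∀ j, idxB l len j = true → j ≤ k → l[j]? = some c → j ≤ pvFall l pi c fuel k) := by
  intro fuel
  induction fuel with
  | zero =>
    intro k hkf hb _
    have hk0 : k = 0 := by omega
    subst hk0
    exact ⟨hb, le_rfl, Or.inl rfl, fun j _ hj _ => hj⟩
  | succ fuel ih =>
    intro k hkf hb hlt
    by_cases hcond : 0 < k ∧ ¬ l.getD k ' ' = c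
    · obtain ⟨hk0, hnc⟩ := hcond
      have hpik : pi.getD (k - 1) 0 = mB l k := by
        have h := hpi (k - 1) (by omega)
        rwa [Nat.sub_add_cancel hk0] at h
      have hk'lt : pi.getD (k - 1) 0 < k := by rw [hpik]; exact mB_lt l k hk0
      have hbk' : idxB l len (pi.getD (k - 1) 0) = true := by
        rw [hpik]; exact idxB_trans l len k _ hb (mB_border l k)
      obtain ⟨r1, r2, r3, r4⟩ := ih (pi.getD (k - 1) 0) (by omega) hbk' (by omega)
      rw [pvFall, if_pos ⟨hk0, hnc⟩]
      refine ⟨r1, by omega, r3, ?_⟩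
      intro j hj hjk hjm
      rcases Nat.lt_or_ge j k with hjlt | hjge
      · have hnst : idxB l k j = true := idxB_nest l len k j hb hj (by omega)
        have hmle : j ≤ mB l k := mB_ge l k j hnst (by omega)
        exact r4 j hj (by omega) hjm
      · have hjk' : j = k := by omega
        subst hjk'
        have hklen : j < l.length := by omega
        rw [List.getElem?_eq_getElem hklen] at hjm
        have hgd : l.getD j ' ' = c := by
          rw [List.getD_eq_getElem l ' ' hklen]; exact Option.some.inj hjm
        exact absurd hgd hnc
    · rw [pvFall, if_neg hcond]
      rcases Nat.eq_zero_or_pos k with hk0 | hk0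
      · subst hk0
        exact ⟨hb, le_rfl, Or.inl rfl, fun j _ hj _ => hj⟩
      · have hklen : k < l.length := by omega
        have hgd : l.getD k ' ' = c := by
          by_contra hne
          exact hcond ⟨hk0, hne⟩
        have hm : l[k]? = some c := by
          rw [List.getElem?_eq_getElem hklen, ← hgd, List.getD_eq_getElem l ' ' hklen]
        exact ⟨hb, le_rfl, Or.inr hm, fun j _ hj _ => hj⟩

-- one step of the pi-building loop computes the longest proper border of the next prefix
lemma step_spec (l : List Char) (pi : List Nat) (i : Nat) (h1 : 1 ≤ i) (h2 : i < l.length)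
    (hpi : ∀ j < i, pi.getD j 0 = mB l (j + 1)) :
    pvStep l pi i = pi ++ [mB l (i + 1)] := by
  have hilen : i ≤ l.length := le_of_lt h2
  have hci : l[i]? = some (l.getD i ' ') := by
    rw [List.getElem?_eq_getElem h2, List.getD_eq_getElem l ' ' h2]
  have hk0 : pi.getD (i - 1) 0 = mB l i := by
    have h := hpi (i - 1) (by omega)
    rwa [Nat.sub_add_cancel h1] at h
  have hb0 : idxB l i (pi.getD (i - 1) 0) = true := by rw [hk0]; exact mB_border l i
  have hlt0 : pi.getD (i - 1) 0 < i := by rw [hk0]; exact mB_lt l i h1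
  obtain ⟨f1, f2, f3, f4⟩ :=
    fall_spec l pi i hilen hpi (l.getD i ' ') (pi.getD (i - 1) 0) (pi.getD (i - 1) 0) le_rfl hb0 hlt0
  simp only [pvStep]
  have key : (if l.getD i ' ' = l.getD (pvFall l pi (l.getD i ' ') (pi.getD (i - 1) 0) (pi.getD (i - 1) 0)) ' '
        then pvFall l pi (l.getD i ' ') (pi.getD (i - 1) 0) (pi.getD (i - 1) 0) + 1
        else pvFall l pi (l.getD i ' ') (pi.getD (i - 1) 0) (pi.getD (i - 1) 0)) = mB l (i + 1) := by
    set k1 := pvFall l pi (l.getD i ' ') (pi.getD (i - 1) 0) (pi.getD (i - 1) 0) with hk1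
    have hk1lt : k1 < i := lt_of_le_of_lt f2 hlt0
    have hk1len : k1 < l.length := by omega
    by_cases hm : l.getD i ' ' = l.getD k1 ' '
    · rw [if_pos hm]
      have hmk1 : l[k1]? = some (l.getD i ' ') := by
        rw [List.getElem?_eq_getElem hk1len, hm, List.getD_eq_getElem l ' ' hk1len]
      have hb1 : idxB l (i + 1) (k1 + 1) = true :=
        (idxB_ext l i k1).mpr ⟨f1, by rw [hmk1, hci]⟩
      have hge : k1 + 1 ≤ mB l (i + 1) := mB_ge l (i + 1) (k1 + 1) hb1 (by omega)
      have hle : mB l (i + 1) ≤ k1 + 1 := by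
        have hMb := mB_border l (i + 1)
        have hMle : mB l (i + 1) ≤ i := by
          have := Nat.findGreatest_le (P := fun k => idxB l (i + 1) k = true) (i + 1 - 1)
          unfold mB at *
          omega
        rcases Nat.eq_zero_or_pos (mB l (i + 1)) with hz | hz
        · omega
        · obtain ⟨j, hj⟩ := Nat.exists_eq_add_of_lt hz
          rw [hj] at hMb hMle ⊢
          simp only [Nat.zero_add] at hMb hMle ⊢
          obtain ⟨e1, e2⟩ := (idxB_ext l i j).mp hMb
          rw [hci] at e2
          have hjk0 : j ≤ mB l i := mB_ge l i j e1 (by omega)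
          have : j ≤ k1 := f4 j e1 (by omega) e2
          omega
      omega
    · rw [if_neg hm]
      have hk10 : k1 = 0 := by
        rcases f3 with h | h
        · exact h
        · exfalso
          rw [List.getElem?_eq_getElem hk1len] at h
          apply hm
          rw [List.getD_eq_getElem l ' ' hk1len]
          exact (Option.some.inj h).symm
      rw [hk10]
      by_contra hne
      have hMb := mB_border l (i + 1)
      have hMle : mB l (i + 1) ≤ i := by
        have := Nat.findGreatest_le (P := fun k => idxB l (i + 1) k = true) (i + 1 - 1)
        unfold mB at *
        omega
      rcases Nat.eq_zero_or_pos (mB l (i + 1)) with hz | hz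
      · exact hne hz.symm
      · obtain ⟨j, hj⟩ := Nat.exists_eq_add_of_lt hz
        rw [hj] at hMb hMle
        simp only [Nat.zero_add] at hMb hMle
        obtain ⟨e1, e2⟩ := (idxB_ext l i j).mp hMb
        rw [hci] at e2
        have hjk0 : j ≤ mB l i := mB_ge l i j e1 (by omega)
        have hjle : j ≤ k1 := f4 j e1 (by omega) e2
        rw [hk10] at hjle
        have hj0 : j = 0 := by omega
        subst hj0
        rw [hk10] at hm
        apply hm
        have h0len : (0 : Nat) < l.length := by omega
        rw [List.getElem?_eq_getElem h0len] at e2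
        rw [List.getD_eq_getElem l ' ' h0len]
        exact (Option.some.inj e2).symm
  rw [key]

-- the built list is the prefix function
lemma pi_good (l : List Char) (t : Nat) (ht : t ≤ l.length - 1) :
    ((List.range' 1 t).foldl (pvStep l) [0]).length = t + 1 ∧
    ∀ j < t + 1, ((List.range' 1 t).foldl (pvStep l) [0]).getD j 0 = mB l (j + 1) := by
  induction t with
  | zero =>
    refine ⟨rfl, fun j hj => ?_⟩
    have hj0 : j = 0 := by omega
    subst hj0
    simp [mB_one]
  | succ t ih =>
    obtain ⟨ihl, ihg⟩ := ih (by omega)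
    have hcat : List.range' 1 (t + 1) = List.range' 1 t ++ [t + 1] := by
      rw [List.range'_concat]
      simp [Nat.add_comm]
    rw [hcat, List.foldl_append, List.foldl_cons, List.foldl_nil]
    have hstep := step_spec l ((List.range' 1 t).foldl (pvStep l) [0]) (t + 1) (by omega)
      (by omega) (by intro j hj; exact ihg j (by omega))
    rw [hstep]
    constructor
    · rw [List.length_append, ihl]; simp
    · intro j hj
      rcases Nat.lt_or_ge j (t + 1) with hlt | hge
      · rw [List.getD_append _ _ _ j (by omega), ihg j (by omega)]
      · have hje : j = t + 1 := by omega
        subst hje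
        have hidx : ((List.range' 1 t).foldl (pvStep l) [0] ++ [mB l (t + 1 + 1)])[t + 1]? =
            some (mB l (t + 1 + 1)) := by
          rw [← ihl]
          exact List.getElem?_concat_length
        simp [List.getD, hidx]

-- specification of the final chain walk (pvChase)
lemma chase_spec (l : List Char) (pi : List Nat) (n : Nat)
    (hpi : ∀ j < n, pi.getD j 0 = mB l (j + 1)) (limit : Nat) :
    ∀ fuel k, k ≤ fuel → idxB l n k = true → k < n →
      idxB l n (pvChase pi limit fuel k) = true ∧
      pvChase pi limit fuel k ≤ limit ∧
      (∀ j, idxB l n j = true → j ≤ k → j ≤ limit → j ≤ pvChase pi limit fuel k) := by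
  intro fuel
  induction fuel with
  | zero =>
    intro k hkf hb _
    have hk0 : k = 0 := by omega
    subst hk0
    exact ⟨hb, Nat.zero_le _, fun j _ hj _ => hj⟩
  | succ fuel ih =>
    intro k hkf hb hlt
    by_cases hcond : limit < k
    · have hk0 : 0 < k := by omega
      have hpik : pi.getD (k - 1) 0 = mB l k := by
        have h := hpi (k - 1) (by omega)
        rwa [Nat.sub_add_cancel hk0] at h
      have hk'lt : pi.getD (k - 1) 0 < k := by rw [hpik]; exact mB_lt l k hk0
      have hbk' : idxB l n (pi.getD (k - 1) 0) = true := by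
        rw [hpik]; exact idxB_trans l n k _ hb (mB_border l k)
      obtain ⟨r1, r2, r3⟩ := ih (pi.getD (k - 1) 0) (by omega) hbk' (by omega)
      rw [pvChase, if_pos hcond]
      refine ⟨r1, r2, ?_⟩
      intro j hj hjk hjlim
      have hjlt : j < k := by omega
      have hnst : idxB l k j = true := idxB_nest l n k j hb hj (by omega)
      have hmle : j ≤ mB l k := mB_ge l k j hnst (by omega)
      exact r3 j hj (by omega) hjlim
    · rw [pvChase, if_neg hcond]
      exact ⟨hb, by omega, fun j _ hj _ => hj⟩

-- take k = drop (n-k) expressed index-wise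
lemma take_eq_drop_iff (l : List Char) (k : Nat) (hk : k ≤ l.length) :
    l.take k = l.drop (l.length - k) ↔ ∀ i < k, l[i]? = l[l.length - k + i]? := by
  constructor
  · intro h i hi
    have h2 := congrArg (fun t => t[i]?) h
    simpa [List.getElem?_drop, hi] using h2
  · intro h
    apply List.ext_getElem?
    intro i
    by_cases hi : i < k
    · simp [List.getElem?_drop, hi, h i hi]
    · have h1 : (l.take k)[i]? = none := by simp; omega
      have h2 : (l.drop (l.length - k))[i]? = none := by simp; omega
      rw [h1, h2]

-- A's slice test is the border predicate
lemma slice_border_iff (s : String) (k : Nat) (h1 : 1 ≤ k) (h2 : k ≤ s.toList.length) :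
    (PySem.Str.slice s none (some (k : Int)) = PySem.Str.slice s (some (-(k : Int))) none)
    ↔ idxB s.toList s.toList.length k = true := by
  have hslice : (PySem.Str.slice s none (some (k : Int)) = PySem.Str.slice s (some (-(k : Int))) none)
      ↔ s.toList.take k = s.toList.drop (s.toList.length - k) := by
    rw [← String.toList_inj, PySem.Str.toList_slice, PySem.Str.toList_slice,
      PySem.Chars.slice_eq_listSlice, PySem.Chars.slice_eq_listSlice,
      PySem.List.slice_to _ (by positivity), PySem.List.slice_from_neg_natCast _ k h1,
      Int.toNat_natCast]
  rw [hslice, take_eq_drop_iff _ k h2, idxB_iff]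
  exact ⟨fun h => ⟨h2, h⟩, fun h => h.2⟩

-- A's ascending fold keeps the LAST match = first match of the reversed candidate list
lemma foldA (s : String) : ∀ (l : List Int) (a : String),
    l.foldl (fun max_side item =>
      if PySem.Str.slice s none (some item) = PySem.Str.slice s (some (-item)) none
      then PySem.Str.slice s none (some item) else max_side) a =
    match l.reverse.find? (fun k =>
        decide (PySem.Str.slice s none (some k) = PySem.Str.slice s (some (-k)) none)) with
    | some k => PySem.Str.slice s none (some k)
    | none => a := by
  intro l
  induction l with
  | nil => intro a; rfl
  | cons x xs ih =>
    intro a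
    simp only [List.foldl_cons, ih, List.reverse_cons, List.find?_append]
    cases h : xs.reverse.find? (fun k =>
        decide (PySem.Str.slice s none (some k) = PySem.Str.slice s (some (-k)) none)) with
    | some k => simp [Option.or]
    | none =>
      by_cases hp : PySem.Str.slice s none (some x) = PySem.Str.slice s (some (-x)) none <;>
        simp [hp, Option.or, List.find?]

-- find? on the reversed ascending range picks the largest satisfying element
lemma find_desc (p : Int → Bool) : ∀ (L r : Nat), 1 ≤ r → r < L → p (r : Int) = true →
    (∀ x : Nat, r < x → x < L → p (x : Int) = false) →
    (PySem.List.pyRange 1 (L : Int) 1).reverse.find? p = some (r : Int) := by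
  intro L
  induction L with
  | zero => intro r h1 h2 _ _; omega
  | succ L ihL =>
    intro r h1 h2 hp hmax
    have hcast : ((L + 1 : Nat) : Int) = (L : Int) + 1 := by push_cast; ring
    have hL1 : (1 : Int) ≤ (L : Int) := by exact_mod_cast Nat.one_le_iff_ne_zero.mpr (by omega)
    rw [hcast, PySem.List.pyRange_one_succ_right hL1, List.reverse_append]
    rcases Nat.lt_succ_iff_lt_or_eq.mp h2 with hlt | heq
    · have hpL : p (L : Int) = false := hmax L hlt (by omega)
      simp only [List.reverse_singleton, List.singleton_append, List.find?_cons, hpL]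
      exact ihL r h1 hlt hp (fun x hx1 hx2 => hmax x hx1 (by omega))
    · subst heq
      simp only [List.reverse_singleton, List.singleton_append, List.find?_cons, hp]

-- ===== VERDICT (by name: the statement is the Claim_ definition above) =====
theorem find_nilaps_spec : Claim_equal_find_nilaps := by
  unfold Claim_equal_find_nilaps
  intro s _
  unfold Spec_find_nilaps
  simp only [find_nilaps, find_nilaps_alt]
  rw [PySem.Str.len_eq s]
  set N := s.toList.length with hN
  have hfd : PySem.Int.floordiv ((N : Int) + 1) 2 = (((N + 1) / 2 : Nat) : Int) := by
    simp [PySem.Int.floordiv, Int.fdiv_eq_ediv]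
  rw [hfd]
  set L := (N + 1) / 2 with hL
  rw [foldA]
  by_cases hN0 : N = 0
  · have hL0 : L = 0 := by omega
    have hre : PySem.List.pyRange 0 ((L : Nat) : Int) 1 = [] := by rw [hL0]; rfl
    rw [hre, if_pos hN0]
    simp
  · have hN1 : 1 ≤ N := by omega
    have hL1 : 1 ≤ L := by omega
    have hLN : L ≤ N := by omega
    rw [if_neg hN0]
    -- B-side facts
    have hpv : pvPi s.toList = (List.range' 1 (N - 1)).foldl (pvStep s.toList) [0] := rfl
    obtain ⟨hplen, hpgood'⟩ := pi_good s.toList (N - 1) (by omega)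
    have hpgood : ∀ j < N, (pvPi s.toList).getD j 0 = mB s.toList (j + 1) := by
      intro j hj
      rw [hpv]
      exact hpgood' j (by omega)
    have hk0 : (pvPi s.toList).getD (N - 1) 0 = mB s.toList N := by
      have h := hpgood (N - 1) (by omega)
      rwa [Nat.sub_add_cancel hN1] at h
    have hcb : idxB s.toList N ((pvPi s.toList).getD (N - 1) 0) = true := by
      rw [hk0]; exact mB_border _ _
    have hclt : (pvPi s.toList).getD (N - 1) 0 < N := by rw [hk0]; exact mB_lt _ _ hN1
    obtain ⟨c1, c2, c3⟩ := chase_spec s.toList (pvPi s.toList) N hpgood (L - 1)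
      ((pvPi s.toList).getD (N - 1) 0) ((pvPi s.toList).getD (N - 1) 0) le_rfl hcb hclt
    set r := pvChase (pvPi s.toList) (L - 1) ((pvPi s.toList).getD (N - 1) 0)
      ((pvPi s.toList).getD (N - 1) 0) with hr
    have hmax : ∀ j, idxB s.toList N j = true → 1 ≤ j → j ≤ L - 1 → j ≤ r := by
      intro j hj hj1 hjL
      have hjk0 : j ≤ mB s.toList N := mB_ge _ _ j hj (by omega)
      exact c3 j hj (by rw [hk0]; exact hjk0) hjL
    -- A side: split off the k = 0 candidate
    have hcons : PySem.List.pyRange 0 ((L : Nat) : Int) 1 = 0 :: PySem.List.pyRange 1 ((L : Nat) : Int) 1 := by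
      apply PySem.List.pyRange_one_cons
      exact_mod_cast hL1
    rw [hcons, List.reverse_cons, List.find?_append]
    have hzero : List.find? (fun k =>
        decide (PySem.Str.slice s none (some k) = PySem.Str.slice s (some (-k)) none)) [0] = none := by
      simp only [List.find?_cons, List.find?_nil]
      have hne0 : ¬ (PySem.Str.slice s none (some (0 : Int)) = PySem.Str.slice s (some (0 : Int)) none) := by
        intro he
        have ht := congrArg String.toList he
        simp only [PySem.Str.toList_slice, PySem.Chars.slice_eq_listSlice,
          PySem.List.slice_zero_start, PySem.List.slice_none_none] at ht
        rw [PySem.List.slice_to _ le_rfl] at ht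
        simp only [Int.toNat_zero, List.take_zero] at ht
        have h0 : s.toList.length = 0 := by rw [← ht]; rfl
        omega
      simp [hne0]
    rw [hzero, Option.or_none]
    by_cases hr0 : r = 0
    · have hfn : (PySem.List.pyRange 1 ((L : Nat) : Int) 1).reverse.find? (fun k =>
          decide (PySem.Str.slice s none (some k) = PySem.Str.slice s (some (-k)) none)) = none := by
        rw [List.find?_eq_none]
        intro x hx
        rw [List.mem_reverse, PySem.List.mem_pyRange_one] at hx
        obtain ⟨hx1, hx2⟩ := hx
        simp only [decide_eq_true_eq]
        intro hp
        have hxL : x.toNat ≤ L - 1 := by omega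
        have hxe : x = (x.toNat : Int) := by omega
        rw [hxe] at hp
        have hbord := (slice_border_iff s x.toNat (by omega) (by omega)).mp hp
        rw [← hN] at hbord
        have := hmax x.toNat hbord (by omega) hxL
        omega
      rw [hfn, if_pos hr0]
      simp
    · have hr1 : 1 ≤ r := by omega
      have hrL : r ≤ L - 1 := c2
      have hfs := find_desc (fun k =>
          decide (PySem.Str.slice s none (some k) = PySem.Str.slice s (some (-k)) none)) L r hr1
        (by omega)
        (by
          simp only [decide_eq_true_eq]
          have hc1 := c1
          rw [hN] at hc1
          exact (slice_border_iff s r hr1 (by omega)).mpr hc1)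
        (by
          intro x hx1 hx2
          simp only [decide_eq_false_iff_not]
          intro hp
          have hbord := (slice_border_iff s x (by omega) (by omega)).mp hp
          rw [← hN] at hbord
          have := hmax x hbord (by omega) (by omega)
          omega)
      rw [hfs]
      have hne : PySem.Str.slice s none (some ((r : Nat) : Int)) ≠ "" := by
        intro he
        have ht := congrArg String.toList he
        simp only [PySem.Str.toList_slice, PySem.Chars.slice_eq_listSlice] at ht
        rw [PySem.List.slice_to _ (by positivity)] at ht
        have hlt := congrArg List.length ht
        simp only [List.length_take, String.toList_empty, List.length_nil] at hlt
        rw [Int.toNat_natCast] at hlt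
        omega
      rw [if_neg hr0]
      simp only [if_neg hne]
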